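-- pv_equiv track=rewrite | github.com/pypi-data/pypi-mirror-162 | packages/CoDocParser/CoDocParser-0.2.49-py3-none-any.whl/docparser/core/tools.py | merge_cell
-- ===== SOURCE A (Python) =====
-- def merge_cell(col_list):
--     """
--     合并列数据
--     :param col_list: 列数据
--     :return: 合并之后的二维列表
--     """
--     result = []
--     max_row_size = max(len(i) for i in col_list)
--     max_col_size = len(col_list)
--
--     for j in range(max_row_size):
--         lst = []
--         for i in range(max_col_size):
--             lst.append(col_list[i][j] if j < len(col_list[i]) else '')
--         result.append(lst)
--
--     return result
-- ===== SOURCE B (Python) =====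
-- def merge_cell(col_list):
--     """
--     合并列数据 — head-peeling transpose: repeatedly take the first element of every
--     column (padding exhausted columns with '') until all columns are exhausted.
--     """
--     result = []
--     cols = list(col_list)
--     while any(cols):
--         result.append([c[0] if c else '' for c in cols])
--         cols = [c[1:] for c in cols]
--     return result
-- ===== Notes on version B (the rewrite author's own statement) =====
-- stated objective: alternative
-- what changed: Replaces A's index-based double loop over range(max_row_size) x range(len(col_list)) (with a j<len guard for padding) by a head-peeling transpose: repeatedly emit the heads of all columns (padding empty ones with '') and drop to the tails until every column is exhausted, with no length computation or indexing at all.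
import Mathlib
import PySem

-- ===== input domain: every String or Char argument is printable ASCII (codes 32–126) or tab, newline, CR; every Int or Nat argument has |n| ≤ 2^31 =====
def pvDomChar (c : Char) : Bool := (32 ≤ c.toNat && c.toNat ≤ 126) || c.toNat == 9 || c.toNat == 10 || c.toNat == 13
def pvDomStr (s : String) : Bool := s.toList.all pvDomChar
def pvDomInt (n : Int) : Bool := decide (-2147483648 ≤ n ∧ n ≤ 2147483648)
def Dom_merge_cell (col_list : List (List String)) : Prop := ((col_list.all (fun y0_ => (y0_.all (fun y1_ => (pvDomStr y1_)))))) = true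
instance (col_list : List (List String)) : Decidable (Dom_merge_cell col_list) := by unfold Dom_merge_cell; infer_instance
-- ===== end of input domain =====

-- B replaces A's index-based double loop by a head-peeling transpose (alternative decomposition, same cost).


-- ===== PORT A =====
-- Literal transliteration: max(len(i) for i in col_list) raises on [], so the port
-- matches on max? (none = the excluded ValueError input); the two appending loops
-- become foldl over pyRange with the same accumulators.
def merge_cell (col_list : List (List String)) : List (List String) :=
  match PySem.List.max? (col_list.map (fun i => (i.length : Int))) (fun x => x) with
  | none => []   -- unreachable under Pre_: Python raises ValueError here
  | some max_row_size =>
    let max_col_size : Int := (col_list.length : Int)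
    (PySem.List.pyRange 0 max_row_size 1).foldl (fun result j =>
      result ++ [(PySem.List.pyRange 0 max_col_size 1).foldl (fun lst i =>
        lst ++ [match PySem.List.pyGet? col_list i with
                | none => ""   -- unreachable: i ∈ range(len(col_list))
                | some ci => if j < (ci.length : Int) then (PySem.List.pyGet? ci j).getD "" else ""]) []]) []

-- ===== PORT B =====
-- while any(cols): result.append([c[0] if c else '' for c in cols]); cols = [c[1:] for c in cols]
-- (c[1:] is List.drop 1 — exact for a nonnegative unit-step slice from 1; the fuel
-- (total sum of column lengths) only bounds the iteration count, it never changes the result)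
def mcLoop : Nat → List (List String) → List (List String) → List (List String)
  | 0, _, result => result
  | fuel + 1, cols, result =>
    if cols.any (fun c => !c.isEmpty) then
      mcLoop fuel (cols.map (fun c => c.drop 1))
             (result ++ [cols.map (fun c => match c with | [] => "" | x :: _ => x)])
    else result

def merge_cell_alt (col_list : List (List String)) : List (List String) :=
  mcLoop (col_list.map List.length).sum col_list []

-- ===== PRECONDITION & SPEC =====
-- Pre_ excludes exactly the empty list, on which Python A raises ValueError (max() of empty sequence).
def Pre_merge_cell (col_list : List (List String)) : Prop := col_list ≠ []
instance (col_list : List (List String)) : Decidable (Pre_merge_cell col_list) := by unfold Pre_merge_cell; infer_instance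
def pvWitness_merge_cell : List (List String) := [["a"], ["b", "c"]]

def Spec_merge_cell (col_list : List (List String)) (out : List (List String)) : Prop := out = merge_cell_alt col_list
instance (col_list : List (List String)) (out : List (List String)) : Decidable (Spec_merge_cell col_list out) := by unfold Spec_merge_cell; infer_instance

-- ===== CLAIM (what is proved, stated in full; the proofs are below) =====
def Claim_equal_merge_cell : Prop := ∀ (col_list : List (List String)), Dom_merge_cell col_list → Pre_merge_cell col_list → Spec_merge_cell col_list (merge_cell col_list)

-- ===== LEMMAS AND PROOFS =====

theorem pvPeel_le (cols : List (List String)) :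
    ((cols.map (fun c => c.drop 1)).map List.length).sum ≤ (cols.map List.length).sum := by
  induction cols with
  | nil => simp
  | cons c t ih =>
    simp only [List.map_cons, List.sum_cons, List.length_drop]
    omega

theorem pvPeel_lt (cols : List (List String))
    (h : cols.any (fun c => !c.isEmpty) = true) :
    ((cols.map (fun c => c.drop 1)).map List.length).sum < (cols.map List.length).sum := by
  induction cols with
  | nil => simp at h
  | cons c t ih =>
    simp only [List.any_cons, Bool.or_eq_true] at h
    simp only [List.map_cons, List.sum_cons, List.length_drop]
    rcases h with h | h
    · cases c with
      | nil => simp at h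
      | cons x xs => have := pvPeel_le t; simp only [List.length_cons] at *; omega
    · have := ih h; omega


-- the common transpose specification both ports are reduced to
def mcSpec (m : Nat) (cols : List (List String)) : List (List String) :=
  (List.range m).map (fun j => cols.map (fun c => c.getD j ""))

def mxLen (cols : List (List String)) : Nat := (cols.map List.length).foldl max 0

theorem foldl_max_init (l : List Nat) (a b : Nat) :
    l.foldl max (max a b) = max a (l.foldl max b) := by
  induction l generalizing b with
  | nil => simp
  | cons x t ih => simp only [List.foldl_cons, Nat.max_assoc]; exact ih (max b x)

theorem mxLen_cons (c : List String) (t : List (List String)) :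
    mxLen (c :: t) = max c.length (mxLen t) := by
  simp only [mxLen, List.map_cons, List.foldl_cons, Nat.zero_max]
  have := foldl_max_init (t.map List.length) c.length 0
  simpa using this

theorem mxLen_eq_zero (cols : List (List String)) (h : cols.any (fun c => !c.isEmpty) = false) :
    mxLen cols = 0 := by
  induction cols with
  | nil => rfl
  | cons c t ih =>
    simp only [List.any_cons, Bool.or_eq_false_iff] at h
    rw [mxLen_cons, ih h.2]
    cases c with
    | nil => rfl
    | cons x xs => simp at h
theorem mxLen_drop (cols : List (List String)) :
    mxLen (cols.map (fun c => c.drop 1)) = mxLen cols - 1 := by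
  induction cols with
  | nil => rfl
  | cons c t ih =>
    rw [List.map_cons, mxLen_cons, mxLen_cons, ih, List.length_drop]
    omega

theorem mxLen_pos (cols : List (List String)) (h : cols.any (fun c => !c.isEmpty) = true) :
    0 < mxLen cols := by
  induction cols with
  | nil => simp at h
  | cons c t ih =>
    rw [mxLen_cons]
    simp only [List.any_cons, Bool.or_eq_true] at h
    rcases h with h | h
    · cases c with
      | nil => simp at h
      | cons x xs => simp
    · exact lt_of_lt_of_le (ih h) (le_max_right _ _)

theorem mcSpec_succ (m : Nat) (cols : List (List String)) :
    mcSpec (m + 1) cols =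
      (cols.map (fun c => match c with | [] => "" | x :: _ => x)) ::
        mcSpec m (cols.map (fun c => c.drop 1)) := by
  simp only [mcSpec, List.range_succ_eq_map, List.map_cons, List.map_map]
  congr 1
  · exact List.map_congr_left (fun c _ => by cases c <;> rfl)
  · exact List.map_congr_left (fun j _ => by
      simp only [Function.comp_apply]
      exact List.map_congr_left (fun c _ => by
        simp [List.getD_eq_getElem?_getD]))

theorem mcLoop_eq (n : Nat) : ∀ (cols res : List (List String)),
    (cols.map List.length).sum ≤ n → mcLoop n cols res = res ++ mcSpec (mxLen cols) cols := by
  induction n with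
  | zero =>
    intro cols res h
    have hany : cols.any (fun c => !c.isEmpty) = false := by
      by_contra hc
      have := pvPeel_lt cols (by revert hc; cases cols.any (fun c => !c.isEmpty) <;> simp)
      omega
    rw [mxLen_eq_zero cols hany]
    simp [mcLoop, mcSpec]
  | succ n ih =>
    intro cols res h
    by_cases hany : cols.any (fun c => !c.isEmpty) = true
    · simp only [mcLoop]
      rw [if_pos hany]
      have hlt := pvPeel_lt cols hany
      rw [ih _ _ (by omega)]
      have hp := mxLen_pos cols hany
      have hm : mxLen cols = (mxLen (cols.map (fun c => c.drop 1))) + 1 := by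
        rw [mxLen_drop]; omega
      rw [hm, mcSpec_succ]
      simp
    · have hf : cols.any (fun c => !c.isEmpty) = false := by
        revert hany; cases cols.any (fun c => !c.isEmpty) <;> simp
      simp only [mcLoop]
      rw [if_neg (by simp [hf]), mxLen_eq_zero cols hf]
      simp [mcSpec]

theorem alt_eq_spec (cols : List (List String)) :
    merge_cell_alt cols = mcSpec (mxLen cols) cols := by
  simpa using mcLoop_eq (cols.map List.length).sum cols [] (le_refl _)

-- casting the running max over column lengths to Int commutes
theorem foldl_max_len_cast (t : List (List String)) (a : Nat) :
    (t.map (fun i => (i.length : Int))).foldl max (a : Int)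
      = (((t.map List.length).foldl max a : Nat) : Int) := by
  induction t generalizing a with
  | nil => rfl
  | cons c u ih =>
    simp only [List.map_cons, List.foldl_cons, ← Nat.cast_max]
    exact ih (max a c.length)

-- row j of A's inner loop = the map over columns
theorem rowA_eq (cols : List (List String)) (j : Nat) :
    (PySem.List.pyRange 0 (cols.length : Int) 1).foldl (fun lst i =>
        lst ++ [match PySem.List.pyGet? cols i with
                | none => ""
                | some ci => if (j : Int) < (ci.length : Int) then (PySem.List.pyGet? ci (j : Int)).getD "" else ""]) []
      = cols.map (fun c => c.getD j "") := by
  rw [PySem.List.foldl_append_singleton_eq_map, List.nil_append,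
      PySem.List.pyRange_one]
  simp only [Int.sub_zero, Int.toNat_natCast, List.map_map]
  apply List.ext_getElem
  · simp
  · intro k h1 h2
    simp only [List.getElem_map, List.getElem_range, Function.comp_apply, Int.zero_add]
    rw [PySem.List.pyGet?_natCast]
    have hk : k < cols.length := by simpa using h1
    rw [List.getElem?_eq_getElem hk]
    simp only [PySem.List.pyGet?_natCast]
    by_cases hj : j < cols[k].length
    · rw [if_pos (by exact_mod_cast hj)]
      simp [List.getD_eq_getElem?_getD, List.getElem?_eq_getElem hj]
    · rw [if_neg (by exact_mod_cast hj), List.getD_eq_getElem?_getD,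
          List.getElem?_eq_none (by omega)]
      rfl

theorem map_pyRange_nat {α : Type} (m : Nat) (g : Int → α) :
    (PySem.List.pyRange 0 (m : Int) 1).map g = (List.range m).map (fun k => g (k : Nat)) := by
  rw [PySem.List.pyRange_one]
  simp [List.map_map, Function.comp]

theorem a_eq_spec (cols : List (List String)) (hne : cols ≠ []) :
    merge_cell cols = mcSpec (mxLen cols) cols := by
  obtain ⟨c, t, rfl⟩ := List.exists_cons_of_ne_nil hne
  have hmax : PySem.List.max? ((c :: t).map (fun i => (i.length : Int))) (fun x => x)
      = some ((mxLen (c :: t) : Nat) : Int) := by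
    rw [List.map_cons, PySem.List.max?_id_cons, foldl_max_len_cast]
    congr 1
  simp only [merge_cell, hmax]
  rw [PySem.List.foldl_append_singleton_eq_map, List.nil_append, map_pyRange_nat]
  unfold mcSpec
  apply List.map_congr_left
  intro k _
  exact rowA_eq (c :: t) k

-- ===== VERDICT (by name: the statement is the Claim_ definition above) =====
theorem merge_cell_spec : Claim_equal_merge_cell := by
  intro cols _ hpre
  unfold Spec_merge_cell
  rw [a_eq_spec cols hpre, alt_eq_spec]
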